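-- pv_equiv track=rewrite | github.com/emilianohg/pruebas-estadisticas | Pruebas.py | dosPares
-- ===== SOURCE A (Python) =====
-- def unPar(numero):
--        long=len(str(numero))
--        numero = (str(numero))[2:long - 1]
--        # Conteo
--        guia = dict.fromkeys(numero, 0)
--        for digito in numero:
--               guia[digito]+=1
--        # Par
--        for conteo in guia.values():
--               if conteo >= 2:
--                      return True
--        return False
--
-- def dosPares(numero):
--        long=len(str(numero))
--        numero = (str(numero))[2:long - 1]
--        # Conteo
--        guia = dict.fromkeys(numero, 0)
--        for digito in numero:
--               guia[digito]+=1
--        # Primer par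
--        # Solo si sabemos que había uno
--        if unPar(numero):
--               par = None
--               for conteo in guia.items():
--                      if conteo[1] >= 2:
--                             par = conteo[0]
--                             break;
--               # Quitamos el que había
--               del guia[par]
--               # Segundo par
--               for conteo in guia.values():
--                      if conteo >= 2:
--                             return True
--               return False
--        else:
--               return False
-- ===== SOURCE B (Python) =====
-- def dosPares(numero):
--     s = str(numero)
--     digits = s[2:len(s) - 1]
--     counts = {}
--     for ch in digits:
--         counts[ch] = counts.get(ch, 0) + 1
--     pairs = sum(1 for v in counts.values() if v >= 2)
--     return pairs >= 2
-- ===== Notes on version B (the rewrite author's own statement) =====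
-- stated objective: simpler
-- what changed: Replaces A's unPar helper call, first-pair search, dict deletion and rescan by one frequency count of the stripped digit string and a direct 'at least two distinct repeated digits' test.
-- intended difference: On numbers whose stripped digit string s1 = str(numero)[2:len-1] has at least two distinct repeated digits while the doubly-stripped substring s1[2:len(s1)-1] has none, A returns False because it mistakenly passes the already-stripped string back into unPar (stripping it twice), whereas B returns True, the intended two-pairs answer. — e.g. on dosPares(1122334): A returns false, B returns true
import Mathlib
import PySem

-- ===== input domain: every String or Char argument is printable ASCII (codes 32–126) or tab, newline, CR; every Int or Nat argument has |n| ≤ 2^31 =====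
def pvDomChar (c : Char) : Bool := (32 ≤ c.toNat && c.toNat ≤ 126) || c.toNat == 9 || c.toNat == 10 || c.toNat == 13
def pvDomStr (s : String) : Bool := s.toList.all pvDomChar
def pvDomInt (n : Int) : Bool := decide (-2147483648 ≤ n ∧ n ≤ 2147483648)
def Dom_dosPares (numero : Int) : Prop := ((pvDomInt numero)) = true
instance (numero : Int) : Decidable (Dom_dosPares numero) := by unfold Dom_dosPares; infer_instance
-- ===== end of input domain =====

-- B counts repeated digits of the stripped string directly (objective: simpler);
-- A's value differs only on the D_ region below, where A's helper re-strips the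
-- already-stripped string.

-- ===== PORT A =====
-- A-side helper: the '# Conteo' block A repeats in unPar and dosPares
-- (dict.fromkeys(numero, 0) then guia[digito] += 1; the key is always present,
-- so 'modify digito 0 (· + 1)' is exact).
def pvConteo (numero : List Char) : PySem.Dict Char Int :=
  numero.foldl (fun d c => d.modify c 0 (· + 1))
    (PySem.Dict.ofList (numero.map (fun c => (c, (0 : Int)))))

def unPar (numero : List Char) : Bool :=
  let long : Int := numero.length
  let numero2 := PySem.List.slice numero (some 2) (some (long - 1))
  let guia := pvConteo numero2
  guia.values.any (fun conteo => conteo ≥ 2)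

def dosPares (numero : Int) : Bool :=
  let s := PySem.Int.toChars numero
  let long : Int := s.length
  let numero2 := PySem.List.slice s (some 2) (some (long - 1))
  let guia := pvConteo numero2
  if unPar numero2 then
    -- 'par = None; for conteo in guia.items(): if conteo[1] >= 2: par = conteo[0]; break'
    match guia.items.find? (fun conteo => conteo.2 ≥ 2) with
    | some par => ((guia.erase par.1).values.any (fun conteo => conteo ≥ 2))
    | none => false  -- Python would raise KeyError on 'del guia[None]'; unreachable (unPar ⇒ a pair exists)
  else false

-- ===== PORT B =====
def dosPares_alt (numero : Int) : Bool :=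
  let s := PySem.Int.toChars numero
  let digits := PySem.List.slice s (some 2) (some ((s.length : Int) - 1))
  let counts := digits.foldl (fun d ch => d.insert ch (d.getD ch 0 + 1)) (PySem.Dict.empty : PySem.Dict Char Int)
  let pairs := (counts.values.filter (fun v => v ≥ 2)).length
  decide (2 ≤ pairs)

-- ===== PRECONDITION & SPEC =====
-- On numbers whose stripped digit string s1 = str(numero)[2:len-1] has at least two
-- distinct repeated digits while the doubly-stripped s1[2:len(s1)-1] has none, A
-- returns False (its helper unPar re-strips the already-stripped string) and B
-- returns True, the intended two-pairs answer.
def D_dosPares (numero : Int) : Prop :=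
  let s1 := (PySem.Int.toChars numero).dropLast.drop 2
  let s2 := s1.dropLast.drop 2
  2 ≤ (PySem.List.dedup s1).countP (fun k => 2 ≤ s1.count k) ∧ ∀ k ∈ s2, s2.count k < 2
instance (numero : Int) : Decidable (D_dosPares numero) := by unfold D_dosPares; infer_instance

def Spec_dosPares (numero : Int) (out : Bool) : Prop := ¬ D_dosPares numero → out = dosPares_alt numero
instance (numero : Int) (out : Bool) : Decidable (Spec_dosPares numero out) := by unfold Spec_dosPares; infer_instance

def pvDiffWitness_dosPares : Int := 1122334
def pvDiffWitnessOut_dosPares : Bool × Bool := (false, true)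

-- ===== CLAIM (what is proved, stated in full; the proofs are below) =====
def Claim_unchanged_dosPares : Prop := ∀ (numero : Int), Dom_dosPares numero → Spec_dosPares numero (dosPares numero)
def Claim_changed_dosPares : Prop := Dom_dosPares (pvDiffWitness_dosPares) ∧ D_dosPares (pvDiffWitness_dosPares) ∧ dosPares (pvDiffWitness_dosPares) = pvDiffWitnessOut_dosPares.1 ∧ dosPares_alt (pvDiffWitness_dosPares) = pvDiffWitnessOut_dosPares.2 ∧ pvDiffWitnessOut_dosPares.1 ≠ pvDiffWitnessOut_dosPares.2
def Claim_exact_dosPares : Prop := ∀ (numero : Int), Dom_dosPares numero → D_dosPares numero → dosPares numero ≠ dosPares_alt numero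

-- ===== LEMMAS AND PROOFS =====

lemma pv_slice2 (l : List Char) :
    PySem.List.slice l (some 2) (some ((l.length : Int) - 1)) = l.dropLast.drop 2 := by
  cases l with
  | nil => rfl
  | cons a t =>
    have hlen : (((a :: t).length : Int)) - 1 = ((t.length : Nat) : Int) := by
      simp
    rw [hlen, show (some (2 : Int)) = some (((2 : Nat) : Int)) by norm_num,
      PySem.List.slice_natCast, List.dropLast_eq_take]
    have h2 : (a :: t).length - 1 = t.length := by simp
    rw [h2, List.drop_take]

lemma pv_D_iff (numero : Int) :
    D_dosPares numero ↔
      (2 ≤ (PySem.List.dedup (PySem.List.slice (PySem.Int.toChars numero) (some 2)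
              (some (((PySem.Int.toChars numero).length : Int) - 1)))).countP
            (fun k => decide (2 ≤ ((PySem.List.slice (PySem.Int.toChars numero) (some 2)
              (some (((PySem.Int.toChars numero).length : Int) - 1))).count k : Int))) ∧
       ((PySem.List.dedup (PySem.List.slice
            (PySem.List.slice (PySem.Int.toChars numero) (some 2) (some (((PySem.Int.toChars numero).length : Int) - 1)))
            (some 2) (some (((PySem.List.slice (PySem.Int.toChars numero) (some 2)
                (some (((PySem.Int.toChars numero).length : Int) - 1))).length : Int) - 1)))).any
          (fun k => decide (2 ≤ ((PySem.List.slice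
            (PySem.List.slice (PySem.Int.toChars numero) (some 2) (some (((PySem.Int.toChars numero).length : Int) - 1)))
            (some 2) (some (((PySem.List.slice (PySem.Int.toChars numero) (some 2)
                (some (((PySem.Int.toChars numero).length : Int) - 1))).length : Int) - 1))).count k : Int))) = false)) := by
  unfold D_dosPares
  simp only [pv_slice2]
  apply and_congr
  · have hf : (fun k => decide (2 ≤ ((PySem.Int.toChars numero).dropLast.drop 2).count k))
        = (fun k => decide (2 ≤ (((PySem.Int.toChars numero).dropLast.drop 2).count k : Int))) := by
      funext k
      rw [decide_eq_decide]
      omega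
    rw [hf]
  · rw [List.any_eq_false]
    constructor
    · intro h k hk
      have := h k ((PySem.List.mem_dedup _ _).mp hk)
      simp only [Bool.not_eq_true, decide_eq_false_iff_not]
      omega
    · intro h k hk
      have := h k ((PySem.List.mem_dedup _ _).mpr hk)
      simp only [Bool.not_eq_true, decide_eq_false_iff_not] at this
      omega

lemma pv_foldl_insert_getD0 : ∀ (ps : List (Char × Int)) (d : PySem.Dict Char Int),
    (∀ k, d.getD k 0 = 0) → (∀ p ∈ ps, p.2 = 0) →
    ∀ k, (ps.foldl (fun d p => d.insert p.1 p.2) d).getD k 0 = 0 := by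
  intro ps
  induction ps with
  | nil => intro d h _ k; exact h k
  | cons p ps ih =>
    intro d h hz k
    refine ih _ ?_ (fun q hq => hz q (List.mem_cons_of_mem _ hq)) k
    intro k'
    rw [PySem.Dict.getD_insert]
    split_ifs
    · exact hz p (List.mem_cons_self ..)
    · exact h k'

lemma pv_getD_fromkeys0 (l : List Char) (k : Char) :
    (PySem.Dict.ofList (l.map (fun c => (c, (0 : Int))))).getD k 0 = 0 := by
  show ((l.map (fun c => (c, (0 : Int)))).foldl (fun d p => d.insert p.1 p.2) PySem.Dict.empty).getD k 0 = 0
  refine pv_foldl_insert_getD0 _ _ (fun k => PySem.Dict.getD_empty ..) ?_ k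
  simp

lemma pv_keys_fromkeys0 (l : List Char) :
    (PySem.Dict.ofList (l.map (fun c => (c, (0 : Int))))).keys = PySem.Set.ofList l := by
  show ((l.map (fun c => (c, (0 : Int)))).foldl (fun d p => d.insert p.1 p.2) PySem.Dict.empty).keys = _
  rw [PySem.Dict.keys_foldl_insert_key _ Prod.fst (fun d p => p.2)]
  simp only [PySem.Dict.keys_empty, List.map_map, PySem.Set.update_nil_left]
  congr 1
  simp [Function.comp_def]

lemma pv_keys_conteo (l : List Char) : (pvConteo l).keys = PySem.List.dedup l := by
  unfold pvConteo
  rw [PySem.Dict.keys_foldl_modify, pv_keys_fromkeys0, PySem.Set.update_eq_append_filter]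
  simp [List.filter_eq_nil_iff]

lemma pv_nodup_keys_conteo (l : List Char) : (pvConteo l).keys.Nodup := by
  rw [pv_keys_conteo]; exact PySem.List.nodup_dedup l

lemma pv_getD_conteo (l : List Char) (k : Char) :
    (pvConteo l).getD k 0 = (l.count k : Int) := by
  unfold pvConteo
  rw [PySem.Dict.getD_foldl_modify_add_one, pv_getD_fromkeys0, zero_add]

lemma pv_items_conteo (l : List Char) :
    (pvConteo l).items = (PySem.List.dedup l).map (fun k => (k, (l.count k : Int))) := by
  rw [PySem.Dict.items_eq_map_keys _ (pv_nodup_keys_conteo l) 0, pv_keys_conteo]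
  exact List.map_congr_left (fun k _ => by rw [pv_getD_conteo])

lemma pv_counter_values (l : List Char) :
    (l.foldl (fun d ch => d.insert ch (d.getD ch 0 + 1)) (PySem.Dict.empty : PySem.Dict Char Int)).values
      = (PySem.List.dedup l).map (fun k => (l.count k : Int)) := by
  rw [PySem.Dict.foldl_insert_getD_add_one_eq_counter]
  show (PySem.Dict.counter l).items.map (·.2) = _
  rw [PySem.Dict.items_counter]
  simp [List.map_map]

lemma pv_any_eq_decide (L : List Char) (p : Char → Bool) :
    L.any p = decide (0 < L.countP p) := by
  rcases h : L.any p with _ | _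
  · simp only [List.any_eq_false] at h
    have h0 : L.countP p = 0 := List.countP_eq_zero.mpr h
    simp [h0]
  · obtain ⟨x, hx, hqx⟩ := List.any_eq_true.mp h
    simp [List.countP_pos_iff.mpr ⟨x, hx, hqx⟩]

lemma pv_pair_count (q : Char → Bool) (K : List Char) (k0 : Char)
    (hnd : K.Nodup) (hmem : k0 ∈ K) (hq : q k0 = true) :
    ((K.filter (fun k => !(k == k0))).any q) = decide (2 ≤ K.countP q) := by
  induction K with
  | nil => simp at hmem
  | cons a K ih =>
    rcases List.mem_cons.mp hmem with rfl | hmem'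
    · have hnin : k0 ∉ K := (List.nodup_cons.mp hnd).1
      have hf : K.filter (fun k => !(k == k0)) = K := by
        apply List.filter_eq_self.mpr
        intro b hb; simp; rintro rfl; exact hnin hb
      rw [List.filter_cons_of_neg (by simp), hf, pv_any_eq_decide,
        List.countP_cons_of_pos (pa := hq), decide_eq_decide]
      omega
    · have hne : a ≠ k0 := by rintro rfl; exact (List.nodup_cons.mp hnd).1 hmem'
      have ih' := ih (List.nodup_cons.mp hnd).2 hmem'
      rw [List.filter_cons_of_pos (by simp [hne]), List.any_cons]
      by_cases hqa : q a = true
      · have h1 : 0 < K.countP q := List.countP_pos_iff.mpr ⟨k0, hmem', hq⟩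
        rw [hqa, List.countP_cons_of_pos (pa := hqa), Bool.true_or]
        have h2 : 2 ≤ K.countP q + 1 := by omega
        simp [h2]
      · simp only [Bool.not_eq_true] at hqa
        rw [hqa, List.countP_cons_of_neg (pa := by simp [hqa]), Bool.false_or, ih']

lemma pv_conteo_values_any (m : List Char) :
    (pvConteo m).values.any (fun v => v ≥ 2)
      = (PySem.List.dedup m).any (fun k => decide (2 ≤ (m.count k : Int))) := by
  show ((pvConteo m).items.map (·.2)).any _ = _
  rw [pv_items_conteo, List.any_map]
  simp [Function.comp_def, ge_iff_le]

lemma pv_erase_values (l : List Char) (k0 : Char) :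
    ((pvConteo l).erase k0).values
      = ((PySem.List.dedup l).filter (fun k => !(k == k0))).map (fun k => (l.count k : Int)) := by
  show ((pvConteo l).erase k0).items.map (·.2) = _
  have h : ((pvConteo l).erase k0).items = (pvConteo l).items.filter (fun p => !(p.1 == k0)) := rfl
  rw [h, pv_items_conteo, List.filter_map]
  simp [List.map_map, Function.comp_def]

lemma pv_slice_sublist (xs : List Char) (a b : Int) :
    (PySem.List.slice xs (some a) (some b)).Sublist xs := by
  simp only [PySem.List.slice]
  exact (List.take_sublist _ _).trans (List.drop_sublist ..)

-- A's core on the stripped string l equals: 'the twice-stripped slice has a repeated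
-- digit' AND 'l has at least two distinct repeated digits'.
lemma pv_core (l : List Char) :
    (if unPar l then
       match (pvConteo l).items.find? (fun conteo => conteo.2 ≥ 2) with
       | some par => ((pvConteo l).erase par.1).values.any (fun conteo => conteo ≥ 2)
       | none => false
     else false)
    = (((PySem.List.dedup (PySem.List.slice l (some 2) (some ((l.length : Int) - 1)))).any
          (fun k => decide (2 ≤ ((PySem.List.slice l (some 2) (some ((l.length : Int) - 1))).count k : Int))))
       && decide (2 ≤ (PySem.List.dedup l).countP (fun k => decide (2 ≤ (l.count k : Int))))) := by
  set s2 := PySem.List.slice l (some 2) (some ((l.length : Int) - 1)) with hs2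
  have hA : unPar l = (PySem.List.dedup s2).any (fun k => decide (2 ≤ (s2.count k : Int))) := by
    show (pvConteo s2).values.any (fun conteo => conteo ≥ 2) = _
    rw [pv_conteo_values_any]
  rw [hA]
  rcases h2 : (PySem.List.dedup s2).any (fun k => decide (2 ≤ (s2.count k : Int))) with _ | _
  · simp
  · rw [Bool.true_and, if_pos rfl]
    obtain ⟨x, hx, hqx⟩ := List.any_eq_true.mp h2
    have hxl : x ∈ l := (pv_slice_sublist l 2 ((l.length : Int) - 1)).mem ((PySem.List.mem_dedup _ _).mp hx)
    have hxcnt : (2 : Int) ≤ (l.count x : Int) := by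
      have hle := (pv_slice_sublist l 2 ((l.length : Int) - 1)).count_le x
      have := of_decide_eq_true hqx
      rw [← hs2] at hle
      omega
    have hq1x : (fun k => decide (2 ≤ (l.count k : Int))) x = true := by
      simpa using hxcnt
    have hsome : ((PySem.List.dedup l).find? (fun k => decide (2 ≤ (l.count k : Int)))).isSome := by
      rw [List.find?_isSome]
      exact ⟨x, (PySem.List.mem_dedup _ _).mpr hxl, hq1x⟩
    rcases hfind : (PySem.List.dedup l).find? (fun k => decide (2 ≤ (l.count k : Int))) with _ | k0
    · rw [hfind] at hsome; simp at hsome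
    have hq0 : (2 : Int) ≤ (l.count k0 : Int) := by
      simpa using List.find?_some hfind
    have hk0 : k0 ∈ PySem.List.dedup l := List.mem_of_find?_eq_some hfind
    have hcomp : ((fun conteo : Char × Int => decide (conteo.2 ≥ 2)) ∘ (fun k => (k, (l.count k : Int))))
        = (fun k => decide (2 ≤ (l.count k : Int))) := by
      funext k; simp [ge_iff_le]
    rw [pv_items_conteo, List.find?_map, hcomp, hfind, Option.map_some]
    show ((pvConteo l).erase k0).values.any (fun conteo => conteo ≥ 2)
        = decide (2 ≤ (PySem.List.dedup l).countP (fun k => decide (2 ≤ (l.count k : Int))))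
    rw [pv_erase_values, List.any_map]
    have := pv_pair_count (fun k => decide (2 ≤ (l.count k : Int))) (PySem.List.dedup l) k0
      (PySem.List.nodup_dedup l) hk0 (by simpa using hq0)
    simp only [Function.comp_def, ge_iff_le]
    exact this

-- B equals the 'two distinct repeated digits in the stripped string' test.
lemma pv_alt (numero : Int) :
    dosPares_alt numero
      = decide (2 ≤ (PySem.List.dedup (PySem.List.slice (PySem.Int.toChars numero) (some 2)
            (some (((PySem.Int.toChars numero).length : Int) - 1)))).countP
          (fun k => decide (2 ≤ ((PySem.List.slice (PySem.Int.toChars numero) (some 2)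
            (some (((PySem.Int.toChars numero).length : Int) - 1))).count k : Int)))) := by
  unfold dosPares_alt
  simp only [pv_counter_values, List.filter_map, List.length_map,
    ← List.countP_eq_length_filter, Function.comp_def, ge_iff_le]

-- A as 'second-strip pair test && B'.
lemma pv_A_split (numero : Int) :
    dosPares numero
      = (((PySem.List.dedup (PySem.List.slice
            (PySem.List.slice (PySem.Int.toChars numero) (some 2) (some (((PySem.Int.toChars numero).length : Int) - 1)))
            (some 2) (some (((PySem.List.slice (PySem.Int.toChars numero) (some 2)
                (some (((PySem.Int.toChars numero).length : Int) - 1))).length : Int) - 1)))).any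
          (fun k => decide (2 ≤ ((PySem.List.slice
            (PySem.List.slice (PySem.Int.toChars numero) (some 2) (some (((PySem.Int.toChars numero).length : Int) - 1)))
            (some 2) (some (((PySem.List.slice (PySem.Int.toChars numero) (some 2)
                (some (((PySem.Int.toChars numero).length : Int) - 1))).length : Int) - 1))).count k : Int))))
         && dosPares_alt numero) := by
  rw [pv_alt]
  unfold dosPares
  exact pv_core _

-- ===== VERDICT (by name: the statement is the Claim_ definition above) =====
theorem dosPares_spec : Claim_unchanged_dosPares := by
  intro numero _ hD
  rw [pv_A_split]
  rw [pv_D_iff] at hD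
  simp only [not_and_or] at hD
  rcases h : (PySem.List.dedup (PySem.List.slice
      (PySem.List.slice (PySem.Int.toChars numero) (some 2) (some (((PySem.Int.toChars numero).length : Int) - 1)))
      (some 2) (some (((PySem.List.slice (PySem.Int.toChars numero) (some 2)
          (some (((PySem.Int.toChars numero).length : Int) - 1))).length : Int) - 1)))).any
      (fun k => decide (2 ≤ ((PySem.List.slice
        (PySem.List.slice (PySem.Int.toChars numero) (some 2) (some (((PySem.Int.toChars numero).length : Int) - 1)))
        (some 2) (some (((PySem.List.slice (PySem.Int.toChars numero) (some 2)
            (some (((PySem.Int.toChars numero).length : Int) - 1))).length : Int) - 1))).count k : Int))) with _ | _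
  · rcases hD with hD | hD
    · rw [pv_alt]
      simp only [Bool.false_and]
      symm
      simpa using hD
    · exact absurd h (by simpa using hD)
  · rw [Bool.true_and]

theorem dosPares_changed : Claim_changed_dosPares := by
  unfold Claim_changed_dosPares
  refine ⟨by decide, ?_, by decide, by decide, by decide⟩
  rw [pv_D_iff]
  decide

theorem dosPares_tight : Claim_exact_dosPares := by
  intro numero _ hD
  rw [pv_A_split, pv_alt]
  rw [pv_D_iff] at hD
  obtain ⟨h1, h2⟩ := hD
  rw [h2, Bool.false_and]
  exact fun hc => absurd h1 (by simpa using hc.symm)
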